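-- pv_equiv track=rewrite | github.com/aberdichevskaia/catalytic-sites-annotation | old_expirements/msa_propagation/align_and_propagate.py | compute_index_mapping
-- ===== SOURCE A (Python) =====
-- def compute_index_mapping(aligned_filtered: str, aligned_original: str) -> dict:
--     """
--     Build a map from positions in the filtered (3Di) alignment
--     to positions in the original sequence.
--     """
--     mapping = {}
--     i_f = i_o = 0
--     for a, b in zip(aligned_filtered, aligned_original):
--         if a != '-' and b != '-':
--             mapping[i_f] = i_o
--             i_f += 1
--             i_o += 1
--         elif a != '-' and b == '-':
--             i_f += 1
--         elif a == '-' and b != '-':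
--             i_o += 1
--     return mapping
-- ===== SOURCE B (Python) =====
-- def _prefix_nongap(s):
--     counts = []
--     total = 0
--     for ch in s:
--         counts.append(total)
--         total += ch != '-'
--     return counts
--
--
-- def compute_index_mapping(aligned_filtered: str, aligned_original: str) -> dict:
--     """
--     Build a map from positions in the filtered (3Di) alignment
--     to positions in the original sequence.
--
--     Two-phase version: first materialize exclusive prefix counts of
--     non-gap characters for each alignment, then select the columns
--     where both are non-gap.
--     """
--     f_before = _prefix_nongap(aligned_filtered)
--     o_before = _prefix_nongap(aligned_original)
--     return {f: o
--             for f, o, a, b in zip(f_before, o_before,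
--                                   aligned_filtered, aligned_original)
--             if a != '-' and b != '-'}
-- ===== Notes on version B (the rewrite author's own statement) =====
-- stated objective: alternative
-- what changed: Replaces A's single fused loop with mutable counters and in-loop dict insertion by a two-phase pipeline: first materialize exclusive prefix counts of non-gap characters for both strings, then a separate selection pass over the zipped columns emits the pairs.
import Mathlib
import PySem

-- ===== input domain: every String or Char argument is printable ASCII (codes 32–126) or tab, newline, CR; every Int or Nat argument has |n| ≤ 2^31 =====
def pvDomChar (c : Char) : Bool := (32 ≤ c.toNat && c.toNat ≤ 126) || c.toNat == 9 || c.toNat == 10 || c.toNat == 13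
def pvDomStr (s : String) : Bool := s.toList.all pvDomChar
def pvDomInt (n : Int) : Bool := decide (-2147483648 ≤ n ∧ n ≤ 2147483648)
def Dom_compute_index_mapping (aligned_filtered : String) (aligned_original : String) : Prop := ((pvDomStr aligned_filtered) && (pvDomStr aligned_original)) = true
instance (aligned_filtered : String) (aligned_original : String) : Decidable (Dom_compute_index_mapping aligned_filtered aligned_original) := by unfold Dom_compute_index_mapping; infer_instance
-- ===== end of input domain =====

-- B replaces A's fused counter loop by a two-phase pipeline (prefix-count tables, then a selection pass); same O(n) cost, return value proved equal.

-- ===== PORT A =====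
-- A: one loop over zip(aligned_filtered, aligned_original) carrying (mapping, i_f, i_o)
def compute_index_mapping (aligned_filtered : String) (aligned_original : String) : List (Int × Int) :=
  ((List.zip aligned_filtered.toList aligned_original.toList).foldl
    (fun (s : PySem.Dict Int Int × Int × Int) ab =>
      if ab.1 ≠ '-' ∧ ab.2 ≠ '-' then (s.1.insert s.2.1 s.2.2, s.2.1 + 1, s.2.2 + 1)
      else if ab.1 ≠ '-' ∧ ab.2 = '-' then (s.1, s.2.1 + 1, s.2.2)
      else if ab.1 = '-' ∧ ab.2 ≠ '-' then (s.1, s.2.1, s.2.2 + 1)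
      else s)
    (PySem.Dict.empty, 0, 0)).1.items

-- ===== PORT B =====
-- _prefix_nongap: appending loop building the exclusive prefix counts of non-'-' chars
def pvPrefixNongap (s : List Char) : List Int :=
  (s.foldl (fun (acc : List Int × Int) ch =>
      (acc.1 ++ [acc.2], acc.2 + (if ch ≠ '-' then 1 else 0))) ([], 0)).1

-- dict comprehension over zip(f_before, o_before, aligned_filtered, aligned_original)
def compute_index_mapping_alt (aligned_filtered : String) (aligned_original : String) : List (Int × Int) :=
  let f_before := pvPrefixNongap aligned_filtered.toList
  let o_before := pvPrefixNongap aligned_original.toList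
  (((f_before.zip o_before).zip (aligned_filtered.toList.zip aligned_original.toList)).foldl
    (fun (d : PySem.Dict Int Int) q =>
      if q.2.1 ≠ '-' ∧ q.2.2 ≠ '-' then d.insert q.1.1 q.1.2 else d)
    PySem.Dict.empty).items

-- ===== PRECONDITION & SPEC =====
def Spec_compute_index_mapping (aligned_filtered : String) (aligned_original : String) (out : List (Int × Int)) : Prop := out = compute_index_mapping_alt aligned_filtered aligned_original
instance (aligned_filtered : String) (aligned_original : String) (out : List (Int × Int)) : Decidable (Spec_compute_index_mapping aligned_filtered aligned_original out) := by unfold Spec_compute_index_mapping; infer_instance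

-- ===== CLAIM (what is proved, stated in full; the proofs are below) =====
def Claim_equal_compute_index_mapping : Prop := ∀ (aligned_filtered : String) (aligned_original : String), Dom_compute_index_mapping aligned_filtered aligned_original → Spec_compute_index_mapping aligned_filtered aligned_original (compute_index_mapping aligned_filtered aligned_original)

-- ===== LEMMAS AND PROOFS =====

/-- Common specification: the mapped pairs produced from counters `cf`, `co`. -/
def goSpec : List (Char × Char) → Int → Int → List (Int × Int)
  | [], _, _ => []
  | (a, b) :: t, cf, co =>
    if a ≠ '-' ∧ b ≠ '-' then (cf, co) :: goSpec t (cf + 1) (co + 1)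
    else goSpec t (cf + (if a ≠ '-' then 1 else 0)) (co + (if b ≠ '-' then 1 else 0))

/-- Exclusive prefix counts, structurally. -/
def prefixFrom (c : Int) : List Char → List Int
  | [] => []
  | ch :: t => c :: prefixFrom (c + (if ch ≠ '-' then 1 else 0)) t

theorem prefixNongap_foldl (l : List Char) : ∀ (out : List Int) (c : Int),
    (l.foldl (fun (acc : List Int × Int) ch =>
      (acc.1 ++ [acc.2], acc.2 + (if ch ≠ '-' then 1 else 0))) (out, c)).1
    = out ++ prefixFrom c l := by
  induction l with
  | nil => intro out c; simp [prefixFrom]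
  | cons ch t ih =>
    intro out c
    simp only [List.foldl_cons, ih, prefixFrom, List.append_assoc, List.singleton_append]

theorem pvPrefixNongap_eq (s : List Char) : pvPrefixNongap s = prefixFrom 0 s := by
  simpa [pvPrefixNongap] using prefixNongap_foldl s [] 0

theorem portA_items (l : List (Char × Char)) : ∀ (d : PySem.Dict Int Int) (cf co : Int),
    (∀ k ∈ d.keys, k < cf) →
    (l.foldl (fun (s : PySem.Dict Int Int × Int × Int) ab =>
      if ab.1 ≠ '-' ∧ ab.2 ≠ '-' then (s.1.insert s.2.1 s.2.2, s.2.1 + 1, s.2.2 + 1)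
      else if ab.1 ≠ '-' ∧ ab.2 = '-' then (s.1, s.2.1 + 1, s.2.2)
      else if ab.1 = '-' ∧ ab.2 ≠ '-' then (s.1, s.2.1, s.2.2 + 1)
      else s) (d, cf, co)).1.items = d.items ++ goSpec l cf co := by
  induction l with
  | nil => intro d cf co _; simp [goSpec]
  | cons ab t ih =>
    obtain ⟨a, b⟩ := ab
    intro d cf co hk
    have hkeep : ∀ (δ : Int), 0 ≤ δ → ∀ k ∈ d.keys, k < cf + δ := fun δ hδ k hm => by
      have := hk k hm; omega
    simp only [List.foldl_cons]
    by_cases h1 : a ≠ '-' ∧ b ≠ '-'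
    · have hnc : d.contains cf = false := by
        have hnm : cf ∉ d.keys := fun h => absurd (hk cf h) (lt_irrefl cf)
        cases hcon : d.contains cf
        · rfl
        · exact absurd ((PySem.Dict.contains_iff_mem_keys d cf).1 hcon) hnm
      rw [if_pos h1, ih (d.insert cf co) (cf + 1) (co + 1) ?_,
          PySem.Dict.items_insert_of_not_contains (d := d) (k := cf) (v := co) hnc]
      · simp [goSpec, h1]
      · intro k hkmem
        rcases (PySem.Dict.mem_keys_insert _ _ _ _).1 hkmem with rfl | hmem
        · omega
        · have := hk k hmem; omega
    · rw [if_neg h1]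
      by_cases h2 : a ≠ '-' ∧ b = '-'
      · rw [if_pos h2, ih d (cf + 1) co (hkeep 1 (by omega))]
        simp [goSpec, h2.1, h2.2]
      · by_cases h3 : a = '-' ∧ b ≠ '-'
        · rw [if_neg h2, if_pos h3, ih d cf (co + 1) hk]
          simp [goSpec, h3.1, h3.2]
        · have ha' : a = '-' := by tauto
          have hb' : b = '-' := by tauto
          rw [if_neg h2, if_neg h3, ih d cf co hk]
          simp [goSpec, ha', hb']

theorem portB_items (lf : List Char) : ∀ (lo : List Char) (d : PySem.Dict Int Int) (cf co : Int),
    (∀ k ∈ d.keys, k < cf) →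
    ((((prefixFrom cf lf).zip (prefixFrom co lo)).zip (lf.zip lo)).foldl
      (fun (d : PySem.Dict Int Int) q =>
        if q.2.1 ≠ '-' ∧ q.2.2 ≠ '-' then d.insert q.1.1 q.1.2 else d) d).items
    = d.items ++ goSpec (lf.zip lo) cf co := by
  induction lf with
  | nil => intro lo d cf co _; simp [prefixFrom, goSpec]
  | cons a tf ih =>
    intro lo d cf co hk
    cases lo with
    | nil => simp [prefixFrom, goSpec]
    | cons b tlo =>
      rw [show prefixFrom cf (a :: tf) = cf :: prefixFrom (cf + (if a ≠ '-' then 1 else 0)) tf from rfl,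
          show prefixFrom co (b :: tlo) = co :: prefixFrom (co + (if b ≠ '-' then 1 else 0)) tlo from rfl,
          List.zip_cons_cons, List.zip_cons_cons, List.zip_cons_cons, List.foldl_cons]
      by_cases h1 : a ≠ '-' ∧ b ≠ '-'
      · have hnc : d.contains cf = false := by
          have hnm : cf ∉ d.keys := fun h => absurd (hk cf h) (lt_irrefl cf)
          cases hcon : d.contains cf
          · rfl
          · exact absurd ((PySem.Dict.contains_iff_mem_keys d cf).1 hcon) hnm
        rw [if_pos h1]
        have h1' : (if a ≠ '-' then (1:Int) else 0) = 1 := by simp [h1.1]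
        have h2' : (if b ≠ '-' then (1:Int) else 0) = 1 := by simp [h1.2]
        rw [h1', h2', ih tlo (d.insert cf co) (cf + 1) (co + 1) ?_,
            PySem.Dict.items_insert_of_not_contains (d := d) (k := cf) (v := co) hnc]
        · simp [goSpec, h1]
        · intro k hkmem
          rcases (PySem.Dict.mem_keys_insert _ _ _ _).1 hkmem with rfl | hmem
          · omega
          · have := hk k hmem; omega
      · rw [if_neg h1,
            ih tlo d (cf + (if a ≠ '-' then 1 else 0)) (co + (if b ≠ '-' then 1 else 0))
              (fun k hm => by have := hk k hm; split <;> omega)]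
        simp [goSpec, h1]

-- ===== VERDICT (by name: the statement is the Claim_ definition above) =====
theorem compute_index_mapping_spec : Claim_equal_compute_index_mapping := by
  intro af ao _
  unfold Spec_compute_index_mapping compute_index_mapping compute_index_mapping_alt
  rw [portA_items _ PySem.Dict.empty 0 0 (by simp [PySem.Dict.keys_empty]),
      pvPrefixNongap_eq, pvPrefixNongap_eq,
      portB_items _ _ PySem.Dict.empty 0 0 (by simp [PySem.Dict.keys_empty])]
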